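-- pv_equiv track=rewrite | github.com/hacerkarayilan/PYTHON | by_age.py | by_age
-- ===== SOURCE A (Python) =====
-- def by_age(ages,x,y):
--     dic={}
--     for k,v in ages.items():
--         if v > x and v<y:
--             if v in dic.keys():
--                 dic[v]+=k
--             elif not(v in dic.keys()):
--                 dic[v]=k
--     return dic
-- ===== SOURCE B (Python) =====
-- def by_age(ages, x, y):
--     # Gather the in-range items once, then build each group's string wholesale:
--     # the dict comprehension keeps first-occurrence order (re-inserting a key
--     # keeps its position and overwrites with the identical full group string).
--     items = [(k, v) for k, v in ages.items() if x < v < y]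
--     return {v: ''.join(k for k, w in items if w == v) for _, v in items}
-- ===== Notes on version B (the rewrite author's own statement) =====
-- stated objective: alternative
-- what changed: A accumulates the grouped dict incrementally while scanning, updating an existing entry with += on each hit; B filters the in-range items once and then builds each value group's concatenated key string wholesale with ''.join in a dict comprehension over the filtered items.
import Mathlib
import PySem

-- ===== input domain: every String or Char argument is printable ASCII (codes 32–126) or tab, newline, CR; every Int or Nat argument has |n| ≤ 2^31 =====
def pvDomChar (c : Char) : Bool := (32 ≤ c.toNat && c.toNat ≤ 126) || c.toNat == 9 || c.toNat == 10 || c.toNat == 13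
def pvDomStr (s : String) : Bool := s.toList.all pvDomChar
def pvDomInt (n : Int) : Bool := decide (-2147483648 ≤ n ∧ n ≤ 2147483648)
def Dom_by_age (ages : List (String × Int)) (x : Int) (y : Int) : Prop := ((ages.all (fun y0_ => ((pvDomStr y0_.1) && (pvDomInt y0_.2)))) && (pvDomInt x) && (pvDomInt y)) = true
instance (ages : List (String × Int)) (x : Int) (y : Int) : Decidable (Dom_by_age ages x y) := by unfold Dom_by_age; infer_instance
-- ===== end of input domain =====

-- B replaces A's incremental accumulate-as-you-scan with a filter-once pass that
-- builds each value-group's concatenated key string wholesale (alternative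
-- decomposition, same return value; not claimed faster).

-- ===== PORT A =====
def by_age (ages : List (String × Int)) (x : Int) (y : Int) : List (Int × String) :=
  (ages.foldl (fun dic kv =>
      if kv.2 > x ∧ kv.2 < y then
        if dic.contains kv.2 then dic.modify kv.2 "" (fun s => s ++ kv.1)
        else dic.insert kv.2 kv.1
      else dic) PySem.Dict.empty).items

-- ===== PORT B =====
def by_age_alt (ages : List (String × Int)) (x : Int) (y : Int) : List (Int × String) :=
  let items := ages.filter (fun kv => decide (x < kv.2 ∧ kv.2 < y))
  (items.foldl (fun d kv =>
      d.insert kv.2 (PySem.Str.join "" (items.filterMap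
        (fun kw => if kw.2 = kv.2 then some kw.1 else none)))) PySem.Dict.empty).items

-- ===== PRECONDITION & SPEC =====
def Spec_by_age (ages : List (String × Int)) (x : Int) (y : Int) (out : List (Int × String)) : Prop := out = by_age_alt ages x y
instance (ages : List (String × Int)) (x : Int) (y : Int) (out : List (Int × String)) : Decidable (Spec_by_age ages x y out) := by unfold Spec_by_age; infer_instance

-- ===== CLAIM (what is proved, stated in full; the proofs are below) =====
def Claim_equal_by_age : Prop := ∀ (ages : List (String × Int)) (x : Int) (y : Int), Dom_by_age ages x y → Spec_by_age ages x y (by_age ages x y)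

-- ===== LEMMAS AND PROOFS =====

-- the concatenation of the keys of l whose value is v (B's join argument)
def pvGrp (l : List (String × Int)) (v : Int) : String :=
  PySem.Str.join "" (l.filterMap (fun kw => if kw.2 = v then some kw.1 else none))

-- the distinct values of m in first-occurrence order
def pvFirsts (m : List Int) : List Int :=
  m.foldl (fun acc v => if v ∈ acc then acc else acc ++ [v]) []

theorem pvMem_foldl_firsts (m : List Int) (acc : List Int) (v : Int) :
    v ∈ m.foldl (fun acc v => if v ∈ acc then acc else acc ++ [v]) acc ↔ v ∈ acc ∨ v ∈ m := by
  induction m generalizing acc with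
  | nil => simp
  | cons a t ih =>
    simp only [List.foldl_cons, ih]
    by_cases h : a ∈ acc
    · by_cases hv : v = a <;> simp [h, hv]
    · by_cases hv : v = a <;> simp [h, hv]

theorem pvMem_firsts (m : List Int) (v : Int) : v ∈ pvFirsts m ↔ v ∈ m := by
  simp [pvFirsts, pvMem_foldl_firsts]

theorem pvFirsts_append (m : List Int) (v : Int) :
    pvFirsts (m ++ [v]) = if v ∈ pvFirsts m then pvFirsts m else pvFirsts m ++ [v] := by
  simp [pvFirsts, List.foldl_append]

theorem pvJoin_nil_flatten (ss : List (List Char)) : PySem.Chars.join [] ss = ss.flatten := by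
  induction ss with
  | nil => rfl
  | cons a t ih => cases t <;> simp_all [PySem.Chars.join, List.intercalate, List.intersperse]

theorem pvStrJoin_append (s t : List String) :
    PySem.Str.join "" (s ++ t) = PySem.Str.join "" s ++ PySem.Str.join "" t := by
  apply String.toList_inj.mp
  simp [PySem.Str.join, pvJoin_nil_flatten]

theorem pvGrp_append (l : List (String × Int)) (k : String) (w v : Int) :
    pvGrp (l ++ [(k, w)]) v = pvGrp l v ++ (if w = v then k else "") := by
  simp only [pvGrp, List.filterMap_append]
  rw [pvStrJoin_append]
  by_cases h : w = v <;>
    simp [h, PySem.Str.join, PySem.Chars.join, List.intercalate]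

theorem pvGrp_of_not_mem (l : List (String × Int)) (v : Int) (h : v ∉ l.map (·.2)) :
    pvGrp l v = "" := by
  have : l.filterMap (fun kw => if kw.2 = v then some kw.1 else none) = [] := by
    rw [List.filterMap_eq_nil_iff]
    intro kw hkw
    have : kw.2 ≠ v := fun hv => h (hv ▸ List.mem_map_of_mem hkw)
    simp [this]
  simp [pvGrp, this, PySem.Str.join, PySem.Chars.join, List.intercalate]

theorem pvContains_mk_map (m : List Int) (F : Int → String) (v : Int) :
    (PySem.Dict.mk (m.map (fun w => (w, F w))) : PySem.Dict Int String).contains v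
      = decide (v ∈ m) := by
  simp only [PySem.Dict.contains, List.any_map, Function.comp_def]
  induction m with
  | nil => simp
  | cons a t ih =>
    by_cases h : a = v
    · simp [h, ih]
    · simp [h, ih, Ne.symm h]

theorem pvGetD_mk_map (m : List Int) (F : Int → String) (v : Int) (hv : v ∈ m) :
    (PySem.Dict.mk (m.map (fun w => (w, F w))) : PySem.Dict Int String).getD v "" = F v := by
  induction m with
  | nil => simp at hv
  | cons a t ih =>
    by_cases h : a = v
    · simp [PySem.Dict.getD, PySem.Dict.get?, h]
    · rcases List.mem_cons.mp hv with h' | h'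
      · exact absurd h'.symm h
      · have := ih h'
        simpa [PySem.Dict.getD, PySem.Dict.get?, h] using this

-- B's fold with a value that depends only on the key: final dict lists each
-- distinct value once, in first-occurrence order.
theorem pvFoldB (F : Int → String) (l : List (String × Int)) :
    l.foldl (fun d kv => d.insert kv.2 (F kv.2)) PySem.Dict.empty
      = PySem.Dict.mk ((pvFirsts (l.map (·.2))).map (fun v => (v, F v))) := by
  induction l using List.reverseRecOn with
  | nil => rfl
  | append_singleton l kv ih =>
    rw [List.foldl_append, List.foldl_cons, List.foldl_nil, ih]
    obtain ⟨k, v⟩ := kv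
    simp only [List.map_append, List.map_cons, List.map_nil, pvFirsts_append]
    by_cases hv : v ∈ pvFirsts (l.map (·.2))
    · simp only [hv, if_pos]
      simp only [PySem.Dict.insert, pvContains_mk_map, hv, decide_true, if_pos]
      congr 1
      rw [List.map_map]
      apply List.map_congr_left
      intro w _
      by_cases h : w = v <;> simp [h]
    · simp only [hv, if_neg, not_false_iff]
      simp only [PySem.Dict.insert, pvContains_mk_map, hv, decide_false, Bool.false_eq_true,
        if_neg, not_false_iff]
      simp [List.map_append]

-- A's fold: same final dict, with F v = the full group string of the scanned list.
theorem pvFoldA (l : List (String × Int)) :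
    l.foldl (fun dic kv =>
        if dic.contains kv.2 then dic.modify kv.2 "" (fun s => s ++ kv.1)
        else dic.insert kv.2 kv.1) PySem.Dict.empty
      = PySem.Dict.mk ((pvFirsts (l.map (·.2))).map (fun v => (v, pvGrp l v))) := by
  induction l using List.reverseRecOn with
  | nil => rfl
  | append_singleton l kv ih =>
    rw [List.foldl_append, List.foldl_cons, List.foldl_nil, ih]
    obtain ⟨k, v⟩ := kv
    simp only [List.map_append, List.map_cons, List.map_nil, pvFirsts_append]
    by_cases hv : v ∈ pvFirsts (l.map (·.2))
    · simp only [hv, if_pos]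
      rw [PySem.Dict.modify]
      simp only [pvContains_mk_map, hv, decide_true, if_pos]
      rw [pvGetD_mk_map _ _ _ hv]
      simp only [PySem.Dict.insert, pvContains_mk_map, hv, decide_true, if_pos]
      congr 1
      rw [List.map_map]
      apply List.map_congr_left
      intro w _
      by_cases h : w = v
      · simp [h, pvGrp_append]
      · have h' : v ≠ w := Ne.symm h
        simp [h, h', pvGrp_append]
    · simp only [hv, if_neg, not_false_iff]
      simp only [PySem.Dict.insert, pvContains_mk_map, hv, decide_false, Bool.false_eq_true,
        if_neg, not_false_iff]
      congr 1
      rw [List.map_append]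
      congr 1
      · apply List.map_congr_left
        intro w hw
        have hne : w ≠ v := fun h => hv (h ▸ hw)
        simp [pvGrp_append, Ne.symm hne]
      · have hnm : v ∉ l.map (·.2) := fun h => hv ((pvMem_firsts _ _).mpr h)
        simp [pvGrp_append, pvGrp_of_not_mem l v hnm]

-- ===== VERDICT (by name: the statement is the Claim_ definition above) =====
theorem by_age_spec : Claim_equal_by_age := by
  intro ages x y _
  unfold Spec_by_age
  have hB : by_age_alt ages x y
      = ((ages.filter (fun kv => decide (x < kv.2 ∧ kv.2 < y))).foldl
          (fun d kv => d.insert kv.2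
            (pvGrp (ages.filter (fun kv => decide (x < kv.2 ∧ kv.2 < y))) kv.2))
          PySem.Dict.empty).items := rfl
  rw [hB, pvFoldB]
  unfold by_age
  rw [show (fun (dic : PySem.Dict Int String) (kv : String × Int) =>
        if kv.2 > x ∧ kv.2 < y then
          if dic.contains kv.2 then dic.modify kv.2 "" (fun s => s ++ kv.1)
          else dic.insert kv.2 kv.1
        else dic)
      = (fun dic kv => if decide (x < kv.2 ∧ kv.2 < y) = true then
          (if dic.contains kv.2 then dic.modify kv.2 "" (fun s => s ++ kv.1)
           else dic.insert kv.2 kv.1) else dic) from by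
        funext dic kv; simp]
  rw [← List.foldl_filter, pvFoldA]
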